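-- pv_equiv track=rewrite | github.com/pypi-data/pypi-mirror-402 | packages/pipelex/pipelex-0.18.0b1.tar.gz/pipelex-0.18.0b1/pipelex/core/pipes/validation.py | is_variable_satisfied_by_inputs
-- ===== SOURCE A (Python) =====
-- def is_variable_satisfied_by_inputs(variable_path: str, input_names: set[str]) -> bool:
--     """Check if a variable path is satisfied by the declared inputs.
--
--     A variable path is satisfied if:
--     - It exactly matches an input name, OR
--     - Its root (or any prefix) matches an input name (attribute access on an input)
--
--     Args:
--         variable_path: The full dotted variable path (e.g., 'page.text_and_images.text')
--         input_names: Set of declared input names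
--
--     Returns:
--         True if the variable path is satisfied by the inputs.
--     """
--     # Check for exact match
--     if variable_path in input_names:
--         return True
--
--     # Check if any prefix of the path matches an input name
--     parts = variable_path.split(".")
--     for idx in range(1, len(parts)):
--         prefix = ".".join(parts[:idx])
--         if prefix in input_names:
--             return True
--
--     return False
-- ===== SOURCE B (Python) =====
-- def is_variable_satisfied_by_inputs(variable_path: str, input_names: set[str]) -> bool:
--     """Scan the declared inputs: the path is satisfied iff some input name equals it
--     or is a dotted-prefix of it (name followed by a '.' boundary)."""
--     for name in input_names:
--         if variable_path == name or variable_path.startswith(name + "."):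
--             return True
--     return False
-- ===== Notes on version B (the rewrite author's own statement) =====
-- stated objective: simpler
-- what changed: Instead of splitting the path on '.' and hashing every generated dotted prefix against the input set, B scans the input names once and tests each name for exact equality or name+'.' being a prefix of the path.
import Mathlib
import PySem

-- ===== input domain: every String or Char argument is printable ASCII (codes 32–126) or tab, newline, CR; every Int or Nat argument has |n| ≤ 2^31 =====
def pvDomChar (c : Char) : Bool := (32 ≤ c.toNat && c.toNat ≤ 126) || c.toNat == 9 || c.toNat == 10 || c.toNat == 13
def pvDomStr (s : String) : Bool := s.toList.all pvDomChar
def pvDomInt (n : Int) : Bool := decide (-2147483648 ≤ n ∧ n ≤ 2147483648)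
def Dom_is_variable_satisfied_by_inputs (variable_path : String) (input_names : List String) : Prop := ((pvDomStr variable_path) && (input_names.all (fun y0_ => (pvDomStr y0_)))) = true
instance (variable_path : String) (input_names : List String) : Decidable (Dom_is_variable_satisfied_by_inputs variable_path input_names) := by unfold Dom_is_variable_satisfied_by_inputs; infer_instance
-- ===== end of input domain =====

-- B replaces A's "build every dotted prefix of the path and hash it" loop by a single scan of the
-- input names testing equality or a name+'.' prefix match; objective: simpler.

-- ===== PORT A =====
-- variable_path.split(".") is ported as PySem.Chars.splitOn on code points (exact: the separator is nonempty);
-- ".".join(parts[:idx]) as PySem.Chars.join over PySem.List.slice.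
def is_variable_satisfied_by_inputs (variable_path : String) (input_names : List String) : Bool :=
  if PySem.Set.contains input_names variable_path then true
  else
    let parts := PySem.Chars.splitOn variable_path.toList ['.']
    (PySem.List.pyRange 1 parts.length 1).any (fun idx =>
      PySem.Set.contains input_names
        (String.ofList (PySem.Chars.join ['.'] (PySem.List.slice parts none (some idx)))))

-- ===== PORT B =====
-- name + "." is ported at the code-point level as name.toList ++ ['.'] (exact).
def is_variable_satisfied_by_inputs_alt (variable_path : String) (input_names : List String) : Bool :=
  input_names.any (fun name =>
    variable_path == name ||
    PySem.Chars.startswith variable_path.toList (name.toList ++ ['.']))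

-- ===== PRECONDITION & SPEC =====
def Spec_is_variable_satisfied_by_inputs (variable_path : String) (input_names : List String) (out : Bool) : Prop := out = is_variable_satisfied_by_inputs_alt variable_path input_names
instance (variable_path : String) (input_names : List String) (out : Bool) : Decidable (Spec_is_variable_satisfied_by_inputs variable_path input_names out) := by unfold Spec_is_variable_satisfied_by_inputs; infer_instance

-- ===== CLAIM (what is proved, stated in full; the proofs are below) =====
def Claim_equal_is_variable_satisfied_by_inputs : Prop := ∀ (variable_path : String) (input_names : List String), Dom_is_variable_satisfied_by_inputs variable_path input_names → Spec_is_variable_satisfied_by_inputs variable_path input_names (is_variable_satisfied_by_inputs variable_path input_names)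

-- ===== LEMMAS AND PROOFS =====

-- A structural model of str.split(".") at the character level.
def splitDot : List Char → List (List Char)
  | [] => [[]]
  | c :: rest =>
    if c = '.' then [] :: splitDot rest
    else
      match splitDot rest with
      | [] => [[c]]
      | p :: ps => (c :: p) :: ps

theorem splitDot_ne_nil (v : List Char) : splitDot v ≠ [] := by
  cases v with
  | nil => simp [splitDot]
  | cons c rest =>
    simp only [splitDot]
    split_ifs
    · simp
    · cases h : splitDot rest <;> simp

theorem ic_cons_cons (c : Char) (q : List Char) (xs : List (List Char)) :
    List.intercalate ['.'] ((c :: q) :: xs) = c :: List.intercalate ['.'] (q :: xs) := by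
  cases xs <;> simp [List.intercalate]

theorem ic_nil_cons (y : List Char) (ys : List (List Char)) :
    List.intercalate ['.'] ([] :: y :: ys) = '.' :: List.intercalate ['.'] (y :: ys) := by
  simp [List.intercalate]

theorem splitOn_go_eq (fuel : Nat) : ∀ (l cur : List Char) (accs : List (List Char)),
    l.length ≤ fuel →
    PySem.Chars.splitOn.go ['.'] fuel l cur accs =
      accs.reverse ++ (cur.reverse ++ (splitDot l).headI) :: (splitDot l).tail := by
  induction fuel with
  | zero =>
    intro l cur accs h
    have : l = [] := List.eq_nil_of_length_eq_zero (Nat.le_zero.mp h)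
    subst this
    simp [PySem.Chars.splitOn.go, splitDot]
  | succ fuel ih =>
    intro l cur accs h
    cases l with
    | nil => simp [PySem.Chars.splitOn.go, splitDot]
    | cons c rest =>
      simp only [PySem.Chars.splitOn.go]
      by_cases hc : c = '.'
      · subst hc
        rw [if_pos (by simp [List.isPrefixOf])]
        simp only [List.length_singleton, List.drop_succ_cons, List.drop_zero]
        rw [ih rest [] _ (by simpa using h)]
        have : (splitDot rest).headI :: (splitDot rest).tail = splitDot rest := by
          cases hs : splitDot rest with
          | nil => exact absurd hs (splitDot_ne_nil rest)
          | cons p ps => simp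
        simp [splitDot, this]
      · rw [if_neg (by simp [List.isPrefixOf]; exact fun he => absurd he.symm hc)]
        rw [ih rest (c :: cur) accs (by simpa using Nat.le_of_succ_le_succ (by simpa using h))]
        simp only [splitDot, if_neg hc]
        cases hs : splitDot rest with
        | nil => exact absurd hs (splitDot_ne_nil rest)
        | cons p ps => simp

theorem splitOn_eq_splitDot (v : List Char) : PySem.Chars.splitOn v ['.'] = splitDot v := by
  show PySem.Chars.splitOn.go ['.'] (v.length + 1) v [] [] = splitDot v
  rw [splitOn_go_eq (v.length + 1) v [] [] (Nat.le_succ _)]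
  cases hs : splitDot v with
  | nil => exact absurd hs (splitDot_ne_nil v)
  | cons p ps => simp

-- The key characterisation: the dotted prefixes A generates are exactly the p with p ++ '.' a prefix of v.
theorem key_iff : ∀ (v p : List Char),
    (∃ k : Nat, 1 ≤ k ∧ k < (splitDot v).length ∧ p = List.intercalate ['.'] ((splitDot v).take k)) ↔
    (∃ t : List Char, v = p ++ '.' :: t) := by
  intro v
  induction v with
  | nil =>
    intro p
    constructor
    · rintro ⟨k, hk1, hk2, -⟩
      simp [splitDot] at hk2; omega
    · rintro ⟨t, ht⟩; cases p <;> simp_all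
  | cons c rest ih =>
    intro p
    obtain ⟨q, qs, hs⟩ : ∃ q qs, splitDot rest = q :: qs := by
      cases h : splitDot rest with
      | nil => exact absurd h (splitDot_ne_nil rest)
      | cons q qs => exact ⟨q, qs, rfl⟩
    by_cases hc : c = '.'
    · subst hc
      have hsv : splitDot ('.' :: rest) = [] :: q :: qs := by simp [splitDot, hs]
      constructor
      · rintro ⟨k, hk1, hk2, hp⟩
        rw [hsv] at hk2 hp
        match k, hk1 with
        | 1, _ =>
          simp [List.intercalate] at hp
          exact ⟨rest, by simp [hp]⟩
        | k' + 2, _ =>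
          have hp' : p = '.' :: List.intercalate ['.'] ((q :: qs).take (k' + 1)) := by
            rw [hp]
            simp only [List.take_succ_cons]
            exact ic_nil_cons q (qs.take k')
          have hk2' : k' + 1 < (splitDot rest).length := by
            rw [hs]; simp at hk2 ⊢; omega
          obtain ⟨t, ht⟩ := (ih (List.intercalate ['.'] ((q :: qs).take (k' + 1)))).mp
            ⟨k' + 1, by omega, hk2', by rw [hs]⟩
          exact ⟨t, by rw [hp']; simp [ht]⟩
      · rintro ⟨t, ht⟩
        cases p with
        | nil =>
          refine ⟨1, le_refl 1, by rw [hsv]; simp, by rw [hsv]; simp [List.intercalate]⟩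
        | cons d p' =>
          injection ht with h1 h2
          subst h1
          obtain ⟨k, hk1, hk2, hp⟩ := (ih p').mpr ⟨t, h2⟩
          rw [hs] at hk2 hp
          refine ⟨k + 1, by omega, by rw [hsv]; simp at hk2 ⊢; omega, ?_⟩
          rw [hsv]
          match k, hk1 with
          | k'' + 1, _ =>
            simp only [List.take_succ_cons] at hp ⊢
            rw [ic_nil_cons, ← hp]
    · have hsv : splitDot (c :: rest) = (c :: q) :: qs := by simp [splitDot, hc, hs]
      constructor
      · rintro ⟨k, hk1, hk2, hp⟩
        rw [hsv] at hk2 hp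
        match k, hk1 with
        | k' + 1, _ =>
          have hp' : p = c :: List.intercalate ['.'] ((q :: qs).take (k' + 1)) := by
            rw [hp]
            simp only [List.take_succ_cons]
            exact ic_cons_cons c q (qs.take k')
          have hk2' : k' + 1 < (splitDot rest).length := by
            rw [hs]; simpa using hk2
          obtain ⟨t, ht⟩ := (ih (List.intercalate ['.'] ((q :: qs).take (k' + 1)))).mp
            ⟨k' + 1, by omega, hk2', by rw [hs]⟩
          exact ⟨t, by rw [hp']; simp [ht]⟩
      · rintro ⟨t, ht⟩
        cases p with
        | nil =>
          injection ht with h1 _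
          exact absurd h1 hc
        | cons d p' =>
          injection ht with h1 h2
          subst h1
          obtain ⟨k, hk1, hk2, hp⟩ := (ih p').mpr ⟨t, h2⟩
          rw [hs] at hk2 hp
          refine ⟨k, hk1, by rw [hsv]; simpa using hk2, ?_⟩
          rw [hsv]
          match k, hk1 with
          | k'' + 1, _ =>
            simp only [List.take_succ_cons] at hp ⊢
            rw [ic_cons_cons, ← hp]

theorem mem_pyRange_one_iff (n : Nat) (i : Int) :
    i ∈ PySem.List.pyRange 1 n 1 ↔ ∃ k : Nat, 1 ≤ k ∧ k < n ∧ i = k := by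
  simp only [PySem.List.pyRange, if_neg (one_ne_zero : (1:Int) ≠ 0),
    if_pos (one_pos : (0:Int) < 1), List.mem_map, List.mem_range]
  have hcount : (if (1:Int) < (n:Int) then (((n:Int) - 1 + 1 - 1) / 1).toNat else 0) = n - 1 := by
    split_ifs with h <;> omega
  rw [hcount]
  constructor
  · rintro ⟨j, hj, rfl⟩
    exact ⟨j + 1, by omega, by omega, by push_cast; ring⟩
  · rintro ⟨k, hk1, hk2, rfl⟩
    exact ⟨k - 1, by omega, by omega⟩

-- ===== VERDICT (by name: the statement is the Claim_ definition above) =====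
theorem is_variable_satisfied_by_inputs_spec : Claim_equal_is_variable_satisfied_by_inputs := by
  intro vp names _
  show is_variable_satisfied_by_inputs vp names = is_variable_satisfied_by_inputs_alt vp names
  rw [Bool.eq_iff_iff]
  unfold is_variable_satisfied_by_inputs is_variable_satisfied_by_inputs_alt
  rw [splitOn_eq_splitDot]
  constructor
  · intro h
    split_ifs at h with hmem
    · have : vp ∈ names := (PySem.Set.contains_iff names vp).mp hmem
      simp only [List.any_eq_true]
      exact ⟨vp, this, by simp⟩
    · simp only [List.any_eq_true] at h
      obtain ⟨idx, hidx, hc⟩ := h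
      obtain ⟨k, hk1, hk2, rfl⟩ := (mem_pyRange_one_iff _ idx).mp hidx
      rw [PySem.List.slice_to _ (by positivity)] at hc
      rw [show ((k : Int).toNat) = k by omega] at hc
      have hname := (PySem.Set.contains_iff names _).mp hc
      obtain ⟨t, ht⟩ := (key_iff vp.toList (List.intercalate ['.'] ((splitDot vp.toList).take k))).mp
        ⟨k, hk1, hk2, rfl⟩
      simp only [List.any_eq_true, Bool.or_eq_true]
      refine ⟨_, hname, Or.inr ?_⟩
      rw [PySem.Chars.startswith_iff]
      rw [show (String.ofList (PySem.Chars.join ['.'] (List.take k (splitDot vp.toList)))).toList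
            = List.intercalate ['.'] ((splitDot vp.toList).take k) by simp [PySem.Chars.join]]
      refine ⟨t, ?_⟩
      conv_rhs => rw [ht]
      simp
  · intro h
    simp only [List.any_eq_true, Bool.or_eq_true, beq_iff_eq,
      PySem.Chars.startswith_iff] at h
    obtain ⟨name, hmem, hcase⟩ := h
    cases hcase with
    | inl heq =>
      rw [if_pos ((PySem.Set.contains_iff names vp).mpr (heq ▸ hmem))]
    | inr hpre =>
      obtain ⟨t, ht⟩ := hpre
      have ht' : vp.toList = name.toList ++ '.' :: t := by rw [← ht]; simp
      obtain ⟨k, hk1, hk2, hp⟩ := (key_iff vp.toList name.toList).mpr ⟨t, ht'⟩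
      split_ifs with hmem2
      · rfl
      · simp only [List.any_eq_true]
        refine ⟨(k : Int), (mem_pyRange_one_iff _ _).mpr ⟨k, hk1, hk2, rfl⟩, ?_⟩
        rw [PySem.List.slice_to _ (by positivity)]
        rw [show ((k : Int).toNat) = k by omega]
        apply (PySem.Set.contains_iff names _).mpr
        have : String.ofList (PySem.Chars.join ['.'] ((splitDot vp.toList).take k)) = name := by
          have h2 : PySem.Chars.join ['.'] ((splitDot vp.toList).take k) = name.toList := by
            show List.intercalate ['.'] ((splitDot vp.toList).take k) = name.toList
            exact hp.symm
          rw [h2]; simp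
        rw [this]; exact hmem
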